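-- pv_equiv track=rewrite | github.com/trues38/recipe-graph-engine | scripts/reload_vps_data.py | is_valid_ingredient
-- ===== SOURCE A (Python) =====
-- def is_valid_ingredient(name: str) -> bool:
--     """유효한 재료 이름인지 확인"""
--     if not name or len(name) < 2:
--         return False
--     # 숫자만 있으면 무효
--     if name.replace(' ', '').isdigit():
--         return False
--     # 특수문자가 너무 많으면 무효
--     if sum(1 for c in name if not c.isalnum() and c != ' ') > 2:
--         return False
--     return True
-- ===== SOURCE B (Python) =====
-- def is_valid_ingredient(name: str) -> bool:
--     """Build a histogram of character classes (space/digit/other-alnum/special),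
--     then decide by arithmetic on the counts instead of staged string scans."""
--     if len(name) < 2:
--         return False
--     counts = {}
--     for c in name:
--         if c == ' ':
--             cat = 'space'
--         elif c.isdigit():
--             cat = 'digit'
--         elif c.isalnum():
--             cat = 'alnum'
--         else:
--             cat = 'special'
--         counts[cat] = counts.get(cat, 0) + 1
--     nonspace = len(name) - counts.get('space', 0)
--     if nonspace > 0 and counts.get('digit', 0) == nonspace:
--         return False
--     return counts.get('special', 0) <= 2
-- ===== Notes on version B (the rewrite author's own statement) =====
-- stated objective: alternative
-- what changed: Replaces A's staged string scans (replace+isdigit over a fresh string plus a generator-sum scan) with a dict histogram of character classes (space/digit/other-alnum/special) built in one pass and a purely arithmetic decision on the counts.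
import Mathlib
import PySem

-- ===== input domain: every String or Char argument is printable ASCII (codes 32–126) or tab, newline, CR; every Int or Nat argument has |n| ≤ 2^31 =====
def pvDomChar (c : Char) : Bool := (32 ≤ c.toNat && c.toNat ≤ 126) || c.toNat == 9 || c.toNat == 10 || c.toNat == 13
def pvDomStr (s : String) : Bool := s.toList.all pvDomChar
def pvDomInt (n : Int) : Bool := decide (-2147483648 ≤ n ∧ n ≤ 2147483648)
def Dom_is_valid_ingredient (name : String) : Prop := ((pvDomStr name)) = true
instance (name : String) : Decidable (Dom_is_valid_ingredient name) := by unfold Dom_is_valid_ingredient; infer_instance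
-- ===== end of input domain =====

-- B replaces A's staged string scans by a histogram of character classes (space/digit/other-alnum/special) decided by arithmetic on the counts; proved equal on Dom.

-- ===== PORT A =====
def is_valid_ingredient (name : String) : Bool :=
  if name.toList.isEmpty || name.toList.length < 2 then false
  else if PySem.Chars.strIsdigit (PySem.Chars.replace name.toList [' '] []) then false
  else if (name.toList.foldl (fun acc c => if (!PySem.Chars.isalnum c) && c != ' ' then acc + 1 else acc) (0 : Int)) > 2 then false
  else true

-- ===== PORT B =====
-- the character class of c, as in Source B
def pvCat (c : Char) : String :=
  if c = ' ' then "space"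
  else if PySem.Chars.isdigit c then "digit"
  else if PySem.Chars.isalnum c then "alnum"
  else "special"

def is_valid_ingredient_alt (name : String) : Bool :=
  if name.toList.length < 2 then false
  else
    let counts : PySem.Dict String Int :=
      name.toList.foldl (fun d c => d.insert (pvCat c) (d.getD (pvCat c) 0 + 1)) PySem.Dict.empty
    let nonspace : Int := (name.toList.length : Int) - counts.getD "space" 0
    if nonspace > 0 && counts.getD "digit" 0 == nonspace then false
    else counts.getD "special" 0 ≤ 2

-- ===== PRECONDITION & SPEC =====
def Spec_is_valid_ingredient (name : String) (out : Bool) : Prop := out = is_valid_ingredient_alt name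
instance (name : String) (out : Bool) : Decidable (Spec_is_valid_ingredient name out) := by unfold Spec_is_valid_ingredient; infer_instance

-- ===== CLAIM (what is proved, stated in full; the proofs are below) =====
def Claim_equal_is_valid_ingredient : Prop := ∀ (name : String), Dom_is_valid_ingredient name → Spec_is_valid_ingredient name (is_valid_ingredient name)

-- ===== LEMMAS AND PROOFS =====

-- replace s ' ' '' is filtering spaces out
theorem replace_go_space (fuel : Nat) : ∀ (l acc : List Char), l.length ≤ fuel →
    PySem.Chars.replace.go [' '] [] fuel l acc = acc.reverse ++ l.filter (· != ' ') := by
  induction fuel with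
  | zero => intro l acc h; cases l <;> simp_all [PySem.Chars.replace.go]
  | succ n ih =>
    intro l acc h
    cases l with
    | nil => simp [PySem.Chars.replace.go]
    | cons c t =>
      by_cases hc : c = ' '
      · subst hc
        rw [show PySem.Chars.replace.go [' '] [] (n+1) (' ' :: t) acc
              = PySem.Chars.replace.go [' '] [] n t acc by
            simp [PySem.Chars.replace.go, List.isPrefixOf]]
        rw [ih t acc (by simpa using h)]
        simp
      · rw [show PySem.Chars.replace.go [' '] [] (n+1) (c :: t) acc
              = PySem.Chars.replace.go [' '] [] n t (c :: acc) by
            simp [PySem.Chars.replace.go, List.isPrefixOf, Ne.symm hc]]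
        rw [ih t (c :: acc) (by simpa using h)]
        simp [hc]

theorem replace_space (cs : List Char) :
    PySem.Chars.replace cs [' '] [] = cs.filter (· != ' ') := by
  rw [PySem.Chars.replace]
  simp [replace_go_space cs.length cs [] le_rfl]

-- B's histogram, read at any key, is a countP over the characters
theorem hist_getD (l : List Char) (v : String) :
    (l.foldl (fun d c => d.insert (pvCat c) (d.getD (pvCat c) 0 + 1))
        (PySem.Dict.empty : PySem.Dict String Int)).getD v 0
      = (l.countP (fun c => pvCat c == v) : Int) := by
  have h := PySem.Dict.getD_foldl_insert_add_one (l.map pvCat) PySem.Dict.empty v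
  rw [List.foldl_map] at h
  simpa [List.count_eq_countP, List.countP_map, Function.comp_def, eq_comm (a := v)] using h

theorem cat_space (c : Char) : (pvCat c == "space") = (c == ' ') := by
  by_cases h : c = ' '
  · simp [pvCat, h]
  · simp only [pvCat, if_neg h]
    split_ifs <;> simp [h]

theorem cat_digit (c : Char) : (pvCat c == "digit") = (c != ' ' && PySem.Chars.isdigit c) := by
  by_cases h : c = ' '
  · simp [pvCat, h]
  · by_cases hd : PySem.Chars.isdigit c = true
    · simp [pvCat, h, hd]
    · simp only [pvCat, if_neg h, if_neg hd]
      split_ifs <;> simp [h, hd]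

theorem cat_special (c : Char) : (pvCat c == "special") = (!PySem.Chars.isalnum c && c != ' ') := by
  by_cases h : c = ' '
  · simp [pvCat, h]
  · by_cases hd : PySem.Chars.isdigit c = true
    · simp [pvCat, h, hd, PySem.Chars.isalnum]
    · by_cases ha : PySem.Chars.isalnum c = true <;> simp [pvCat, h, hd, ha]

-- length of the space-free part
theorem length_filter_ne_space (l : List Char) :
    (l.filter (· != ' ')).length = l.length - l.count ' ' := by
  induction l with
  | nil => simp
  | cons c t ih =>
    have hle : t.count ' ' ≤ t.length := List.count_le_length
    by_cases h : c = ' ' <;> simp [h, ih] <;> omega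

-- A's isdigit-on-the-space-free-string test, characterised by B's counts
theorem cond2_iff (l : List Char) :
    PySem.Chars.strIsdigit (l.filter (· != ' ')) = true ↔
      ((0 : Int) < (l.length : Int) - (l.count ' ' : Int) ∧
        (l.countP (fun c => c != ' ' && PySem.Chars.isdigit c) : Int)
          = (l.length : Int) - (l.count ' ' : Int)) := by
  have hcount : l.countP (fun c => c != ' ' && PySem.Chars.isdigit c)
      = (l.filter (· != ' ')).countP PySem.Chars.isdigit := by
    rw [List.countP_filter]
    exact List.countP_congr (fun c _ => by rw [Bool.and_comm])
  have hlen := length_filter_ne_space l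
  have hle : l.count ' ' ≤ l.length := List.count_le_length
  have hcle : (l.filter (· != ' ')).countP PySem.Chars.isdigit ≤ (l.filter (· != ' ')).length :=
    List.countP_le_length
  constructor
  · intro h
    rw [PySem.Chars.strIsdigit] at h
    simp only [Bool.and_eq_true, Bool.not_eq_true'] at h
    obtain ⟨hne', hall⟩ := h
    have hc : (l.filter (· != ' ')).countP PySem.Chars.isdigit = (l.filter (· != ' ')).length :=
      List.countP_eq_length.mpr (List.all_eq_true.mp hall)
    have h0 : (l.filter (· != ' ')).length ≠ 0 := by
      intro h0
      rw [List.length_eq_zero_iff] at h0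
      simp [h0] at hne'
    constructor <;> omega
  · rintro ⟨h1, h2⟩
    have hc : (l.filter (· != ' ')).countP PySem.Chars.isdigit = (l.filter (· != ' ')).length := by
      omega
    have h0 : (l.filter (· != ' ')).length ≠ 0 := by omega
    have hneq : l.filter (· != ' ') ≠ [] := by
      intro e
      rw [e] at h0
      exact h0 rfl
    rw [PySem.Chars.strIsdigit]
    simp [List.all_eq_true.mpr (List.countP_eq_length.mp hc), hneq]

-- ===== VERDICT (by name: the statement is the Claim_ definition above) =====
theorem is_valid_ingredient_spec : Claim_equal_is_valid_ingredient := by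
  intro name _
  unfold Spec_is_valid_ingredient
  simp only [is_valid_ingredient, is_valid_ingredient_alt, hist_getD, cat_space, cat_digit, cat_special]
  set l := name.toList with hl
  rw [replace_space l,
      show (fun acc c => if (!PySem.Chars.isalnum c) && c != ' ' then acc + 1 else acc)
        = (fun (acc : Int) c => if ((fun c => (!PySem.Chars.isalnum c) && c != ' ') c) then acc + 1 else acc) from rfl,
      PySem.List.foldl_if_add_one,
      ← List.count_eq_countP]
  simp only [zero_add]
  by_cases hlen : l.length < 2
  · rw [if_pos (by simp [hlen]), if_pos hlen]
  · rw [if_neg (show ¬ (l.isEmpty || decide (l.length < 2)) = true by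
          simp [List.isEmpty_iff, ← List.length_eq_zero_iff]
          omega),
        if_neg hlen]
    by_cases hd : PySem.Chars.strIsdigit (l.filter (· != ' ')) = true
    · obtain ⟨h1, h2⟩ := (cond2_iff l).mp hd
      rw [if_pos hd,
          if_pos (show _ = true by
            simp only [gt_iff_lt, Bool.and_eq_true, decide_eq_true_iff, beq_iff_eq]
            exact ⟨h1, h2⟩)]
    · have hB : ¬ ((0 : Int) < (l.length : Int) - (l.count ' ' : Int) ∧
          (l.countP (fun c => c != ' ' && PySem.Chars.isdigit c) : Int)
            = (l.length : Int) - (l.count ' ' : Int)) := fun h => hd ((cond2_iff l).mpr h)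
      rw [if_neg hd,
          if_neg (show ¬ _ = true by
            simp only [gt_iff_lt, Bool.and_eq_true, decide_eq_true_iff, beq_iff_eq]
            exact hB)]
      by_cases hs : (l.countP (fun c => !PySem.Chars.isalnum c && c != ' ') : Int) > 2
      · rw [if_pos hs]
        symm
        simp only [decide_eq_false_iff_not, not_le]
        omega
      · rw [if_neg hs]
        symm
        simp only [decide_eq_true_iff]
        omega
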